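-- pv_equiv track=rewrite | github.com/gaspernovak20/P1 | DN/DN03/testi.py | stevilo_ovir
-- ===== SOURCE A (Python) =====
-- def stevilo_ovir(vrstica):
--     st_ovir = 0
--     znana_ovira = False
--     for c in vrstica:
--         if c == "#" and not znana_ovira:
--             st_ovir += 1
--             znana_ovira = True
--
--         if c == "." and znana_ovira:
--             znana_ovira = False
--
--     return st_ovir
-- ===== SOURCE B (Python) =====
-- def stevilo_ovir(vrstica):
--     return sum(1 for part in vrstica.split('.') if '#' in part)
-- ===== Notes on version B (the rewrite author's own statement) =====
-- stated objective: simpler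
-- what changed: Replaced the streaming two-flag state machine with segment-based counting: split the line on '.' and count the pieces that contain at least one '#'.
import Mathlib
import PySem

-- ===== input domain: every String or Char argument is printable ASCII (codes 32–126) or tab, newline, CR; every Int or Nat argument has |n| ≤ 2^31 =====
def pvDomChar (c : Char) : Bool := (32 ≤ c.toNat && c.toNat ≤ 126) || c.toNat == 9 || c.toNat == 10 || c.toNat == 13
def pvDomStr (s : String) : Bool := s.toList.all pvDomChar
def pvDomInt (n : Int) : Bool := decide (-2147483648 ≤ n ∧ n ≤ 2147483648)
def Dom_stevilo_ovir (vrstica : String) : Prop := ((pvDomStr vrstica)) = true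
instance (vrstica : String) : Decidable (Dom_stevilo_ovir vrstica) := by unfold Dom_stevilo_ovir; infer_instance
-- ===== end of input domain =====

-- B replaces A's streaming two-flag state machine by segment counting: split on '.' and
-- count the pieces containing '#' (objective: simpler).

-- ===== PORT A =====
-- state = (st_ovir, znana_ovira); the two sequential ifs of A's loop body kept in order
-- the loop body of A (the two sequential ifs, in order)
def pvStepA (st : Int × Bool) (c : Char) : Int × Bool :=
  let st := if c == '#' && !st.2 then (st.1 + 1, true) else st
  let st := if c == '.' && st.2 then (st.1, false) else st
  st

def stevilo_ovir (vrstica : String) : Int :=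
  (vrstica.toList.foldl pvStepA (0, false)).1

-- ===== PORT B =====
-- vrstica.split('.') with the non-empty separator '.' is exactly PySem.Chars.splitOn;
-- '#' in part is PySem.Chars.isIn; the generator sum is filter-then-length
def stevilo_ovir_alt (vrstica : String) : Int :=
  (((PySem.Chars.splitOn vrstica.toList ['.']).filter
      (fun part => PySem.Chars.isIn ['#'] part)).length : Int)

-- ===== PRECONDITION & SPEC =====
def Spec_stevilo_ovir (vrstica : String) (out : Int) : Prop := out = stevilo_ovir_alt vrstica
instance (vrstica : String) (out : Int) : Decidable (Spec_stevilo_ovir vrstica out) := by unfold Spec_stevilo_ovir; infer_instance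

-- ===== CLAIM (what is proved, stated in full; the proofs are below) =====
def Claim_equal_stevilo_ovir : Prop := ∀ (vrstica : String), Dom_stevilo_ovir vrstica → Spec_stevilo_ovir vrstica (stevilo_ovir vrstica)

-- ===== LEMMAS AND PROOFS =====

-- does a segment contain '#' (B's part predicate)
def pvHasHash (cs : List Char) : Bool := PySem.Chars.isIn ['#'] cs

-- the number of obstacle groups A still counts on the rest of the line, given the flag
def pvNatLoop : List Char → Bool → Nat
  | [], _ => 0
  | c :: rest, flag =>
      (if c = '#' ∧ flag = false then 1 else 0) +
        pvNatLoop rest (if c = '.' then false else (flag || c == '#'))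

theorem pvHasHash_eq (cs : List Char) : pvHasHash cs = decide ('#' ∈ cs) := by
  by_cases h : '#' ∈ cs
  · have hin : ['#'] <:+: cs := by
      obtain ⟨s, t, rfl⟩ := List.append_of_mem h
      exact ⟨s, t, by simp⟩
    simp [pvHasHash, (PySem.Chars.isIn_iff_infix _ _).mpr hin, h]
  · have hni : ¬ (['#'] <:+: cs) := fun hi => h (hi.subset (List.mem_singleton_self _))
    simp [pvHasHash, h]
    exact (PySem.Chars.isIn_eq_false_iff _ _).mpr hni

theorem pvHasHash_nil : pvHasHash [] = false := by simp [pvHasHash_eq]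

theorem pvHasHash_cons (c : Char) (cs : List Char) :
    pvHasHash (c :: cs) = ((c == '#') || pvHasHash cs) := by
  by_cases h : c = '#'
  · subst h; simp [pvHasHash_eq, List.mem_cons]
  · have h2 : ¬ ('#' = c) := fun hh => h hh.symm
    simp [pvHasHash_eq, List.mem_cons, h, h2]

theorem pvHasHash_reverse (cs : List Char) : pvHasHash cs.reverse = pvHasHash cs := by
  simp [pvHasHash_eq]

-- one iteration of A's loop body, in closed form
theorem pvStep (st : Int) (flag : Bool) (c : Char) :
    pvStepA (st, flag) c
    = (st + (if c = '#' ∧ flag = false then 1 else 0),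
        if c = '.' then false else (flag || c == '#')) := by
  unfold pvStepA
  by_cases hd : c = '.'
  · by_cases hc : c = '#'
    · rw [hc] at hd; exact absurd hd (by decide)
    · cases flag <;> simp [hc, hd]
  · by_cases hc : c = '#'
    · cases flag <;> simp [hc, hd]
    · cases flag <;> simp [hc, hd]

theorem pvFoldA (l : List Char) : ∀ (st : Int) (flag : Bool),
    (l.foldl pvStepA (st, flag)).1 = st + pvNatLoop l flag := by
  induction l with
  | nil => intro st flag; simp [pvNatLoop]
  | cons c rest ih =>
      intro st flag
      rw [List.foldl_cons, pvStep, ih]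
      simp only [pvNatLoop]
      push_cast
      ring

theorem pvGoCount : ∀ (fuel : Nat) (l cur : List Char) (acc : List (List Char)),
    l.length < fuel →
    ((PySem.Chars.splitOn.go ['.'] fuel l cur acc).countP pvHasHash)
      = acc.countP pvHasHash + (if pvHasHash cur then 1 else 0) + pvNatLoop l (pvHasHash cur) := by
  intro fuel
  induction fuel with
  | zero => intro l cur acc h; omega
  | succ n ih =>
      intro l cur acc h
      cases l with
      | nil =>
          rw [PySem.Chars.splitOn.go]
          · simp [List.countP_reverse, List.countP_cons, pvHasHash_reverse, pvNatLoop]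
          · omega
      | cons c rest =>
          by_cases hd : c = '.'
          · subst hd
            have hpre : List.isPrefixOf ['.'] ('.' :: rest) = true := by
              simp [List.isPrefixOf]
            rw [PySem.Chars.splitOn.go]
            simp only [hpre, if_true, List.length_cons, List.length_nil, List.drop_succ_cons,
              List.drop_zero]
            rw [ih rest [] (cur.reverse :: acc) (by simpa using Nat.lt_of_succ_lt_succ h)]
            simp only [List.countP_cons, pvHasHash_reverse, pvHasHash_nil, pvNatLoop]
            cases hcur : pvHasHash cur <;> simp
          · have hpre : List.isPrefixOf ['.'] (c :: rest) = false := by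
              simp [List.isPrefixOf]
              intro hcd; exact absurd hcd.symm hd
            rw [PySem.Chars.splitOn.go]
            simp only [hpre, Bool.false_eq_true, if_false]
            rw [ih rest (c :: cur) acc (by simpa using Nat.lt_of_succ_lt_succ h)]
            by_cases hc : c = '#'
            · cases hcur : pvHasHash cur <;>
                simp [pvHasHash_cons, hc, hcur, pvNatLoop] <;> omega
            · cases hcur : pvHasHash cur <;>
                simp [pvHasHash_cons, hc, hcur, pvNatLoop, hd]

-- ===== VERDICT (by name: the statement is the Claim_ definition above) =====
theorem stevilo_ovir_spec : Claim_equal_stevilo_ovir := by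
  intro vrstica _
  unfold Spec_stevilo_ovir stevilo_ovir stevilo_ovir_alt
  rw [pvFoldA, PySem.Chars.splitOn, ← List.countP_eq_length_filter,
    show (fun part => PySem.Chars.isIn ['#'] part) = pvHasHash from rfl,
    pvGoCount (vrstica.toList.length + 1) vrstica.toList [] [] (by omega)]
  simp [pvHasHash_nil]
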